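-- pv_equiv track=rewrite | github.com/pypi-data/pypi-mirror-382 | packages/one-step-frames/one_step_frames-1.3.5-py3-none-any.whl/one_step_frames/util/core/simplify.py | fixParentheses
-- ===== SOURCE A (Python) =====
-- def fixParentheses(text: str) -> str:
--     depth = 0
--     trimmed = list(text)
--
--     for char in text:
--         if char == '(':
--             depth += 1
--         elif char == ')':
--             if depth > 0:
--                 depth -= 1
--             else:
--                 # Unmatched closing bracket (early)
--                 pass
--
--     # Remove unmatched closing brackets at the end
--     while depth < 0 and trimmed and trimmed[-1] == ')':
--         trimmed.pop()
--         depth += 1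
--
--     # If there are extra closing brackets (but matched), just strip them from the end
--     while trimmed and trimmed[-1] == ')':
--         # Check if the current ending ')' has a matching '('
--         temp_depth = 0
--         for c in trimmed:
--             if c == '(':
--                 temp_depth += 1
--             elif c == ')':
--                 temp_depth -= 1
--         if temp_depth >= 0:
--             break  # All matched
--         trimmed.pop()
--
--     return ''.join(trimmed)
-- ===== SOURCE B (Python) =====
-- def fixParentheses(text: str) -> str:
--     bal = text.count('(') - text.count(')')
--     end = len(text)
--     while bal < 0 and end > 0 and text[end - 1] == ')':
--         end -= 1
--         bal += 1
--     return text[:end]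
-- ===== Notes on version B (the rewrite author's own statement) =====
-- stated objective: faster
-- what changed: B computes the paren balance once with two counts and pops trailing ')' while the balance is negative (incrementing it), instead of A's loop that recomputes the whole balance by rescanning the string before each pop.
import Mathlib
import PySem

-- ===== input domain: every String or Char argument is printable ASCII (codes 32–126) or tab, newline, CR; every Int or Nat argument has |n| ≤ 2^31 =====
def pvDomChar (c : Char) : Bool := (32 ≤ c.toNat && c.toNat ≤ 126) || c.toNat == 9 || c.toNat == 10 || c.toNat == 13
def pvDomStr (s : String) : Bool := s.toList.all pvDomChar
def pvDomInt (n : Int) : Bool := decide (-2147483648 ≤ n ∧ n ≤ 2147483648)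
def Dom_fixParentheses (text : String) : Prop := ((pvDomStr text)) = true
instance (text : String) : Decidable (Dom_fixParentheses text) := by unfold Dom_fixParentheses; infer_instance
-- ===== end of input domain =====

-- B strips trailing ')' in one pass using a balance computed once by two counts (O(n))
-- instead of A's rescan-the-whole-string-before-each-pop loop (O(n^2)).

-- ===== PORT A =====
-- the first for-loop of A: depth, decremented only when positive
def pvDepthStep (d : Int) (c : Char) : Int :=
  if c = '(' then d + 1
  else if c = ')' then (if d > 0 then d - 1 else d)
  else d

-- A's inner temp_depth for-loop
def pvTempStep (d : Int) (c : Char) : Int :=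
  if c = '(' then d + 1 else if c = ')' then d - 1 else d

-- A's first while-loop (depth < 0 and last char ')': pop)
def pvWhile1 (depth : Int) (t : List Char) : List Char :=
  if depth < 0 ∧ t.getLast? = some ')' then pvWhile1 (depth + 1) t.dropLast
  else t
termination_by t.length
decreasing_by
  simp [List.length_dropLast]
  rename_i h
  cases t with
  | nil => simp at h
  | cons a l => simp

-- A's second while-loop: recompute temp_depth over trimmed, pop last ')' while it is < 0
def pvWhile2 (t : List Char) : List Char :=
  if t.getLast? = some ')' ∧ t.foldl pvTempStep 0 < 0 then pvWhile2 t.dropLast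
  else t
termination_by t.length
decreasing_by
  simp [List.length_dropLast]
  rename_i h
  cases t with
  | nil => simp at h
  | cons a l => simp

def fixParentheses (text : String) : String :=
  let trimmed := text.toList
  let depth := trimmed.foldl pvDepthStep 0
  String.ofList (pvWhile2 (pvWhile1 depth trimmed))

-- ===== PORT B =====
-- B scans from the end (index end-1 in Source B = head of the reversed list here),
-- dropping ')' while the balance is negative, incrementing the balance.
def pvStrip : Int → List Char → List Char
  | bal, c :: rest => if bal < 0 ∧ c = ')' then pvStrip (bal + 1) rest else c :: rest
  | _,   []        => []

def fixParentheses_alt (text : String) : String :=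
  let l := text.toList
  -- text.count('(') - text.count(')'): single-char substring count = char count
  let bal : Int := (l.count '(' : Int) - (l.count ')' : Int)
  String.ofList (pvStrip bal l.reverse).reverse

-- ===== PRECONDITION & SPEC =====
def Spec_fixParentheses (text : String) (out : String) : Prop := out = fixParentheses_alt text
instance (text : String) (out : String) : Decidable (Spec_fixParentheses text out) := by unfold Spec_fixParentheses; infer_instance

-- ===== CLAIM (what is proved, stated in full; the proofs are below) =====
def Claim_equal_fixParentheses : Prop := ∀ (text : String), Dom_fixParentheses text → Spec_fixParentheses text (fixParentheses text)

-- ===== LEMMAS AND PROOFS =====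

def pvBal (l : List Char) : Int := (l.count '(' : Int) - (l.count ')' : Int)

theorem pvTemp_eq_bal (l : List Char) : ∀ a : Int, l.foldl pvTempStep a = a + pvBal l := by
  induction l with
  | nil => intro a; simp [pvBal]
  | cons c rest ih =>
      intro a
      simp only [List.foldl_cons, ih, pvBal, pvTempStep, List.count_cons]
      split_ifs <;> simp_all <;> ring

theorem pvDepth_nonneg (l : List Char) : ∀ a : Int, 0 ≤ a → 0 ≤ l.foldl pvDepthStep a := by
  induction l with
  | nil => intro a h; simpa
  | cons c rest ih =>
      intro a h
      simp only [List.foldl_cons]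
      apply ih
      simp only [pvDepthStep]
      split_ifs <;> omega

theorem pvWhile1_id (depth : Int) (t : List Char) (h : 0 ≤ depth) : pvWhile1 depth t = t := by
  unfold pvWhile1
  rw [if_neg]
  rintro ⟨h1, _⟩
  omega

theorem pvBal_append_close (x : List Char) : pvBal (x ++ [')']) = pvBal x - 1 := by
  simp [pvBal]
  ring

theorem pvMain (r : List Char) : pvWhile2 r.reverse = (pvStrip (pvBal r.reverse) r).reverse := by
  induction r with
  | nil => simp [pvWhile2, pvStrip]
  | cons c rest ih =>
      have hrev : (c :: rest).reverse = rest.reverse ++ [c] := by simp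
      rw [hrev]
      unfold pvWhile2 pvStrip
      rw [pvTemp_eq_bal]
      by_cases hc : c = ')' ∧ pvBal (rest.reverse ++ [c]) < 0
      · rw [if_pos (by exact ⟨by simp [hc.1], by have := hc.2; omega⟩), if_pos (by exact ⟨by omega, hc.1⟩)]
        have : pvBal (rest.reverse ++ [c]) + 1 = pvBal rest.reverse := by
          rw [hc.1, pvBal_append_close]; ring
        rw [List.dropLast_concat, this, ih]
      · rw [if_neg (by simp only [List.getLast?_concat, Option.some.injEq, zero_add]; tauto),
            if_neg (by rintro ⟨hb, hcc⟩; exact hc ⟨hcc, by omega⟩)]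
        simp

-- ===== VERDICT (by name: the statement is the Claim_ definition above) =====
theorem fixParentheses_spec : Claim_equal_fixParentheses := by
  intro text _
  unfold Spec_fixParentheses fixParentheses fixParentheses_alt
  have h1 := pvWhile1_id (text.toList.foldl pvDepthStep 0) text.toList
      (pvDepth_nonneg _ 0 le_rfl)
  have h2 := pvMain text.toList.reverse
  simp only [List.reverse_reverse] at h2
  simp only [h1, h2, pvBal]
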